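-- pv_equiv track=rewrite | github.com/animeshokhade/dsa | scaler/Length of longest consecutive ones.py | solve
-- ===== SOURCE A (Python) =====
-- def solve(A):
--     countOne = 0
--     for i in range(len(A)):
--         if A[i] == '1':
--             countOne += 1
--
--     count, maxCount = 0, 0
--     for i in range(len(A)):
--         l = i - 1
--         r = i + 1
--         L = R = 0
--         while l >= 0:
--             if A[l] == '1':
--                 L += 1
--                 l -= 1
--             else: break
--
--         while r < len(A):
--             if A[r] == '1':
--                 R += 1
--                 r += 1
--             else: break
--
--         if A[i] == '1':
--             maxCount = max(count, L + R + 1)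
--             count = maxCount
--
--         else:
--             if countOne > L + R:
--                 maxCount = max(count, L + R + 1)
--                 count = maxCount
--
--             else:
--                 maxCount = max(count, L + R)
--                 count = maxCount
--
--     return maxCount
-- ===== SOURCE B (Python) =====
-- def solve(A):
--     n = len(A)
--     countOne = sum(1 for c in A if c == '1')
--     left = []
--     run = 0
--     for c in A:
--         left.append(run)
--         run = run + 1 if c == '1' else 0
--     right = []
--     run = 0
--     for c in reversed(A):
--         right.append(run)
--         run = run + 1 if c == '1' else 0
--     right.reverse()
--     best = 0
--     for i in range(n):
--         s = left[i] + right[i]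
--         if A[i] == '1' or countOne > s:
--             s += 1
--         if s > best:
--             best = s
--     return best
-- ===== Notes on version B (the rewrite author's own statement) =====
-- stated objective: faster
-- what changed: Replaces the per-index while-loop scans for the left/right one-runs (quadratic) with two linear scan-built run-length arrays reused by the same per-index formula.
import Mathlib
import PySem

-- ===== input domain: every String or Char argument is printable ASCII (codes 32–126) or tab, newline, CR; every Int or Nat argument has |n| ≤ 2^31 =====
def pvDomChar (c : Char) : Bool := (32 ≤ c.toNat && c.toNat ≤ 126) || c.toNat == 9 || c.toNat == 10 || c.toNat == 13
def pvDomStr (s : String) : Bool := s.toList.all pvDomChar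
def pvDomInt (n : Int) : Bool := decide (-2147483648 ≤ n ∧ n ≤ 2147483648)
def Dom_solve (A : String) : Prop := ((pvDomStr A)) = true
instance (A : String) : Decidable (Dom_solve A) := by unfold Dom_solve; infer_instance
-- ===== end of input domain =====

-- B replaces A's per-index while-loop scans by two linear scan-built run-length arrays (asymptotically faster).

-- B replaces A's per-index while-loop scans by two linear scan-built run-length arrays.

-- ===== PORT A =====
-- while l >= 0: ... (l is always < len(A) at every call site in solve, so pyGet? never misses; the none branch is unreachable)
def solveWL (cs : List Char) (l : Int) (L : Int) : Int :=
  if h : 0 ≤ l then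
    match PySem.List.pyGet? cs l with
    | some c => if c = '1' then solveWL cs (l - 1) (L + 1) else L
    | none => L
  else L
termination_by (l + 1).toNat
decreasing_by omega

def solveWR (cs : List Char) (r : Int) (R : Int) : Int :=
  if h : r < (cs.length : Int) then
    match PySem.List.pyGet? cs r with
    | some c => if c = '1' then solveWR cs (r + 1) (R + 1) else R
    | none => R
  else R
termination_by ((cs.length : Int) - r).toNat
decreasing_by omega

def solve (A : String) : Int :=
  let cs := A.toList
  let n : Int := (cs.length : Int)
  let countOne := (PySem.List.pyRange 0 n 1).foldl
    (fun acc i => if PySem.List.pyGetD cs i ' ' = '1' then acc + 1 else acc) (0 : Int)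
  let st := (PySem.List.pyRange 0 n 1).foldl
    (fun (st : Int × Int) i =>
      let L := solveWL cs (i - 1) 0
      let R := solveWR cs (i + 1) 0
      if PySem.List.pyGetD cs i ' ' = '1' then
        let m := max st.1 (L + R + 1); (m, m)
      else if countOne > L + R then
        let m := max st.1 (L + R + 1); (m, m)
      else
        let m := max st.1 (L + R); (m, m)) ((0 : Int), (0 : Int))
  st.2

-- ===== PORT B =====
-- the loop "for c in A: left.append(run); run = run+1 if c=='1' else 0" as structural recursion
def solveBuild : List Char → Int → List Int
  | [], _ => []
  | c :: t, run => run :: solveBuild t (if c = '1' then run + 1 else 0)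

def solve_alt (A : String) : Int :=
  let cs := A.toList
  let n : Int := (cs.length : Int)
  let countOne := cs.foldl (fun acc c => if c = '1' then acc + 1 else acc) (0 : Int)
  let left := solveBuild cs 0
  let right := (solveBuild cs.reverse 0).reverse
  (PySem.List.pyRange 0 n 1).foldl
    (fun best i =>
      let s := PySem.List.pyGetD left i 0 + PySem.List.pyGetD right i 0
      let s := if PySem.List.pyGetD cs i ' ' = '1' ∨ countOne > s then s + 1 else s
      if s > best then s else best) (0 : Int)

-- ===== PRECONDITION & SPEC =====
def Spec_solve (A : String) (out : Int) : Prop := out = solve_alt A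
instance (A : String) (out : Int) : Decidable (Spec_solve A out) := by unfold Spec_solve; infer_instance

-- ===== CLAIM (what is proved, stated in full; the proofs are below) =====
def Claim_equal_solve : Prop := ∀ (A : String), Dom_solve A → Spec_solve A (solve A)

-- ===== LEMMAS AND PROOFS =====

def lrunAux : List Char → Int → Nat → Int
  | _, r, 0 => r
  | [], r, _ + 1 => r
  | c :: t, r, i + 1 => lrunAux t (if c = '1' then r + 1 else 0) i

theorem solveBuild_length (cs : List Char) (r : Int) : (solveBuild cs r).length = cs.length := by
  induction cs generalizing r with
  | nil => rfl
  | cons c t ih => simp [solveBuild, ih]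

theorem solveBuild_get (cs : List Char) (r : Int) (i : Nat) (h : i < (solveBuild cs r).length) :
    (solveBuild cs r)[i] = lrunAux cs r i := by
  induction cs generalizing r i with
  | nil => simp [solveBuild] at h
  | cons c t ih =>
    cases i with
    | zero => simp [solveBuild, lrunAux]
    | succ j =>
      simp only [solveBuild, List.getElem_cons_succ, lrunAux]
      exact ih _ j (by simpa [solveBuild] using h)

theorem lrunAux_succ (cs : List Char) (r : Int) (i : Nat) (h : i < cs.length) :
    lrunAux cs r (i + 1) = if cs[i] = '1' then lrunAux cs r i + 1 else 0 := by
  induction cs generalizing r i with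
  | nil => simp at h
  | cons c t ih =>
    cases i with
    | zero =>
      cases t with
      | nil => simp [lrunAux]
      | cons d u => simp [lrunAux]
    | succ j => simpa [lrunAux] using ih _ j (by simpa using h)

theorem solveWL_acc_aux (cs : List Char) (k : Nat) :
    ∀ (l L : Int), (l + 1).toNat ≤ k → solveWL cs l L = L + solveWL cs l 0 := by
  induction k with
  | zero =>
    intro l L h
    conv_lhs => rw [solveWL]
    conv_rhs => rw [solveWL]
    simp [show ¬ (0:Int) ≤ l by omega]
  | succ k ih =>
    intro l L h
    conv_lhs => rw [solveWL]
    conv_rhs => rw [solveWL]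
    by_cases hl : (0:Int) ≤ l
    · simp only [dif_pos hl]
      cases hget : PySem.List.pyGet? cs l with
      | none => simp
      | some c =>
        by_cases hc : c = '1'
        · simp only [hc, if_true]
          rw [ih (l-1) (L+1) (by omega), ih (l-1) (0+1) (by omega)]
          ring
        · simp [hc]
    · simp [hl]

theorem solveWL_acc (cs : List Char) (l L : Int) : solveWL cs l L = L + solveWL cs l 0 :=
  solveWL_acc_aux cs (l + 1).toNat l L le_rfl

theorem solveWL_eq_lrunAux (cs : List Char) (i : Nat) (h : i ≤ cs.length) :
    solveWL cs ((i : Int) - 1) 0 = lrunAux cs 0 i := by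
  induction i with
  | zero => rw [solveWL]; simp [lrunAux]
  | succ j ih =>
    have hj : j < cs.length := by omega
    have e : ((j + 1 : Nat) : Int) - 1 = (j : Int) := by push_cast; ring
    rw [e, solveWL]
    have hget : PySem.List.pyGet? cs (j : Int) = some cs[j] := by
      rw [PySem.List.pyGet?_natCast]
      exact List.getElem?_eq_getElem hj
    simp only [dif_pos (by omega : (0:Int) ≤ (j : Int)), hget]
    rw [lrunAux_succ cs 0 j hj]
    by_cases hc : cs[j] = '1'
    · simp only [hc, if_true]
      rw [solveWL_acc, ih (by omega)]
      ring
    · simp [hc]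

theorem solveWR_eq_rev_aux (cs : List Char) (k : Nat) :
    ∀ (j R : Int), 0 ≤ j → ((cs.length : Int) - j).toNat ≤ k →
      solveWR cs j R = solveWL cs.reverse ((cs.length : Int) - 1 - j) R := by
  induction k with
  | zero =>
    intro j R hj h
    rw [solveWR, solveWL]
    simp [show ¬ j < (cs.length : Int) by omega]
  | succ k ih =>
    intro j R hj h
    by_cases hlt : j < (cs.length : Int)
    · have hjlen : j.toNat < cs.length := by omega
      have hm : cs.length - 1 - j.toNat < cs.reverse.length := by simp; omega
      have hget : PySem.List.pyGet? cs j = some (cs[j.toNat]'hjlen) := by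
        rw [PySem.List.pyGet?_of_nonneg cs hj]
        exact List.getElem?_eq_getElem hjlen
      have hrev : PySem.List.pyGet? cs.reverse ((cs.length : Int) - 1 - j)
          = some (cs[j.toNat]'hjlen) := by
        have hcast : ((cs.length : Int) - 1 - j) = ((cs.length - 1 - j.toNat : Nat) : Int) := by omega
        rw [hcast, PySem.List.pyGet?_natCast, List.getElem?_eq_getElem hm]
        congr 1
        rw [List.getElem_reverse]
        congr 1
        omega
      rw [solveWR, solveWL]
      simp only [dif_pos hlt, dif_pos (by omega : (0:Int) ≤ (cs.length : Int) - 1 - j), hget, hrev]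
      by_cases hc : cs[j.toNat]'hjlen = '1'
      · simp only [hc, if_true]
        rw [ih (j + 1) (R + 1) (by omega) (by omega)]
        have harg : ((cs.length : Int) - 1 - (j + 1)) = (cs.length : Int) - 1 - j - 1 := by ring
        rw [harg]
      · simp [hc]
    · rw [solveWR, solveWL]
      simp [hlt]

theorem solveWR_eq_lrunAux (cs : List Char) (k : Nat) (hk : k < cs.length) :
    solveWR cs ((k : Int) + 1) 0 = lrunAux cs.reverse 0 (cs.length - 1 - k) := by
  rw [solveWR_eq_rev_aux cs ((cs.length : Int) - ((k:Int)+1)).toNat ((k : Int) + 1) 0 (by omega) le_rfl]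
  have hm : ((cs.length : Int) - 1 - ((k : Int) + 1)) = ((cs.length - 1 - k : Nat) : Int) - 1 := by omega
  rw [hm, solveWL_eq_lrunAux cs.reverse _ (by simp; omega)]

theorem pairFold_eq_bestFold (li : List Int) (f g : Int → Int) (m : Int)
    (hfg : ∀ i ∈ li, f i = g i) :
    (li.foldl (fun (st : Int × Int) i => (max st.1 (f i), max st.1 (f i))) (m, m)).2
      = li.foldl (fun b i => if g i > b then g i else b) m := by
  induction li generalizing m with
  | nil => rfl
  | cons a t ih =>
    simp only [List.foldl_cons]
    rw [hfg a (by simp)]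
    have e : (if g a > m then g a else m) = max m (g a) := by
      rcases le_total m (g a) with h | h
      · rw [max_eq_right h]; split <;> omega
      · rw [max_eq_left h]; split <;> omega
    rw [e]
    exact ih _ (fun i hi => hfg i (List.mem_cons_of_mem a hi))

theorem left_get (cs : List Char) (i : Int) (h0 : 0 ≤ i) (h1 : i < (cs.length : Int)) :
    PySem.List.pyGetD (solveBuild cs 0) i 0 = lrunAux cs 0 i.toNat := by
  rw [PySem.List.pyGetD_eq_getElem _ _ h0 (by rw [solveBuild_length]; exact h1)]
  exact solveBuild_get cs 0 i.toNat _

theorem right_get (cs : List Char) (i : Int) (h0 : 0 ≤ i) (h1 : i < (cs.length : Int)) :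
    PySem.List.pyGetD ((solveBuild cs.reverse 0).reverse) i 0
      = lrunAux cs.reverse 0 (cs.length - 1 - i.toNat) := by
  have hlen : ((solveBuild cs.reverse 0).reverse).length = cs.length := by
    simp [solveBuild_length]
  rw [PySem.List.pyGetD_eq_getElem _ _ h0 (by rw [hlen]; exact h1)]
  rw [List.getElem_reverse, solveBuild_get]
  congr 1
  simp [solveBuild_length]

theorem solve_spec : Claim_equal_solve := by
  intro A _
  unfold Spec_solve solve solve_alt
  dsimp only
  set cs := A.toList with hcs
  rw [PySem.List.foldl_pyRange_zero_pyGetD' cs ' '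
        (fun acc c => if c = '1' then acc + 1 else acc) (0:Int)]
  set C := cs.foldl (fun acc c => if c = '1' then acc + 1 else acc) (0:Int) with hC
  set fA : Int → Int := fun i =>
    if PySem.List.pyGetD cs i ' ' = '1' then
      solveWL cs (i - 1) 0 + solveWR cs (i + 1) 0 + 1
    else if C > solveWL cs (i - 1) 0 + solveWR cs (i + 1) 0 then
      solveWL cs (i - 1) 0 + solveWR cs (i + 1) 0 + 1
    else
      solveWL cs (i - 1) 0 + solveWR cs (i + 1) 0 with hfA
  set gB : Int → Int := fun i =>
    if PySem.List.pyGetD cs i ' ' = '1' ∨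
        C > PySem.List.pyGetD (solveBuild cs 0) i 0
              + PySem.List.pyGetD ((solveBuild cs.reverse 0).reverse) i 0 then
      PySem.List.pyGetD (solveBuild cs 0) i 0
        + PySem.List.pyGetD ((solveBuild cs.reverse 0).reverse) i 0 + 1
    else
      PySem.List.pyGetD (solveBuild cs 0) i 0
        + PySem.List.pyGetD ((solveBuild cs.reverse 0).reverse) i 0 with hgB
  have hfg : ∀ i ∈ PySem.List.pyRange 0 (cs.length : Int) 1, fA i = gB i := by
    intro i hi
    rw [PySem.List.mem_pyRange_one] at hi
    have hL : solveWL cs (i - 1) 0 = PySem.List.pyGetD (solveBuild cs 0) i 0 := by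
      rw [left_get cs i hi.1 hi.2]
      have e : i - 1 = ((i.toNat : Nat) : Int) - 1 := by omega
      rw [e, solveWL_eq_lrunAux cs i.toNat (by omega)]
    have hR : solveWR cs (i + 1) 0
        = PySem.List.pyGetD ((solveBuild cs.reverse 0).reverse) i 0 := by
      rw [right_get cs i hi.1 hi.2]
      have e : i + 1 = ((i.toNat : Nat) : Int) + 1 := by omega
      rw [e, solveWR_eq_lrunAux cs i.toNat (by omega)]
    rw [hfA, hgB]
    dsimp only
    rw [hL, hR]
    by_cases h1 : PySem.List.pyGetD cs i ' ' = '1'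
    · simp [h1]
    · by_cases h2 : C > PySem.List.pyGetD (solveBuild cs 0) i 0
          + PySem.List.pyGetD ((solveBuild cs.reverse 0).reverse) i 0
      · simp [h1, h2]
      · simp [h1, h2]
  have hbodyA : (fun (st : Int × Int) i =>
      let L := solveWL cs (i - 1) 0
      let R := solveWR cs (i + 1) 0
      if PySem.List.pyGetD cs i ' ' = '1' then
        let m := max st.1 (L + R + 1); (m, m)
      else if C > L + R then
        let m := max st.1 (L + R + 1); (m, m)
      else
        let m := max st.1 (L + R); (m, m))
      = fun (st : Int × Int) i => (max st.1 (fA i), max st.1 (fA i)) := by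
    funext st i
    rw [hfA]
    dsimp only
    split_ifs <;> rfl
  rw [hbodyA, pairFold_eq_bestFold _ fA gB 0 hfg, hgB]
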